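-- pv_equiv track=rewrite | github.com/NJNAN/kafka-flink-video-streaming-asr | subtitle-agent/agent/context_analyzer.py | transcript_sample
-- ===== SOURCE A (Python) =====
-- def transcript_sample(items: list[dict], max_chars: int = 18000) -> str:
--     parts: list[str] = []
--     used = 0
--     for index, item in enumerate(items, start=1):
--         line = f"{index}. {item.get('text', '')}\n"
--         if used + len(line) > max_chars:
--             break
--         parts.append(line)
--         used += len(line)
--     return "".join(parts)
-- ===== SOURCE B (Python) =====
-- def transcript_sample(items: list[dict], max_chars: int = 18000) -> str:
--     # Build every numbered line up front, take prefix sums of their lengths,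
--     # then binary-search for the cutoff and slice: no running-total/break loop.
--     lines = [f"{i}. {item.get('text', '')}\n" for i, item in enumerate(items, start=1)]
--     prefix = []
--     total = 0
--     for ln in lines:
--         total += len(ln)
--         prefix.append(total)
--     lo, hi = 0, len(lines)
--     while lo < hi:
--         mid = (lo + hi) // 2
--         if prefix[mid] <= max_chars:
--             lo = mid + 1
--         else:
--             hi = mid
--     return "".join(lines[:lo])
-- ===== Notes on version B (the rewrite author's own statement) =====
-- stated objective: alternative
-- what changed: Replaces the single running-total loop with early break by a build-table-then-slice shape: build all numbered lines, compute prefix sums of their lengths, binary-search the prefix-sum table for the cutoff count, and join a slice.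
import Mathlib
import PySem

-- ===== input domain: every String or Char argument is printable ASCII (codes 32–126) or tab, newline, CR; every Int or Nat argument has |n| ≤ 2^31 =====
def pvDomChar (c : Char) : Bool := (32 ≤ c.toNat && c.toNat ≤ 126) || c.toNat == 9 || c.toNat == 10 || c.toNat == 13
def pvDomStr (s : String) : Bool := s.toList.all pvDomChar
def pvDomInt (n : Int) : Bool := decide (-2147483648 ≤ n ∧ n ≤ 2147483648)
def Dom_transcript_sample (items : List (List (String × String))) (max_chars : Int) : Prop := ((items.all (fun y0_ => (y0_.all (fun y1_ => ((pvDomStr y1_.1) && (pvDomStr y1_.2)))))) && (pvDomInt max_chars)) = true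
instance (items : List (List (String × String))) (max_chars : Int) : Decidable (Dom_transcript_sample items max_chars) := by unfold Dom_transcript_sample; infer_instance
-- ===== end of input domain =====

-- B replaces A's running-total loop with early break by build-all-lines /
-- prefix-sums / binary-search-the-cutoff / join-a-slice (objective: alternative).

-- the f-string  f"{index}. {item.get('text', '')}\n"  (shared by both ports)
def tsLine (index : Int) (item : List (String × String)) : String :=
  PySem.Int.toStr index ++ ". " ++ (PySem.Dict.ofList item).getD "text" "" ++ "\n"

-- ===== PORT A =====
-- the for-loop with break: parts/used accumulators, index from enumerate(items, 1)
def tsLoop (max_chars : Int) : List (List (String × String)) → Int → Int → List String → List String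
  | [], _, _, parts => parts
  | item :: rest, index, used, parts =>
    let line := tsLine index item
    if used + PySem.Str.len line > max_chars then parts
    else tsLoop max_chars rest (index + 1) (used + PySem.Str.len line) (parts ++ [line])

def transcript_sample (items : List (List (String × String))) (max_chars : Int) : String :=
  PySem.Str.join "" (tsLoop max_chars items 1 0 [])

-- ===== PORT B =====
-- the prefix-sum loop of Source B (prefix, total accumulators)
def tsPrefix (lines : List String) : List Int :=
  (lines.foldl (fun st ln => (st.1 ++ [st.2 + PySem.Str.len ln], st.2 + PySem.Str.len ln))
    (([] : List Int), (0 : Int))).1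

-- the while-loop binary search of Source B; prefix[mid] is always in range here,
-- ported as getD with default 0
def tsSearch (pre : List Int) (max_chars : Int) (lo hi : Nat) : Nat :=
  if lo < hi then
    let mid := (lo + hi) / 2
    if pre.getD mid 0 ≤ max_chars then tsSearch pre max_chars (mid + 1) hi
    else tsSearch pre max_chars lo mid
  else lo
termination_by hi - lo
decreasing_by all_goals omega

def transcript_sample_alt (items : List (List (String × String))) (max_chars : Int) : String :=
  let lines := (PySem.List.enumerate items 1).map (fun p => tsLine p.1 p.2)
  let pre := tsPrefix lines
  let cut := tsSearch pre max_chars 0 lines.length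
  PySem.Str.join "" (lines.take cut)  -- lines[:cut] with cut : Nat (slice with a nonnegative bound is take)

-- ===== PRECONDITION & SPEC =====
def Spec_transcript_sample (items : List (List (String × String))) (max_chars : Int) (out : String) : Prop := out = transcript_sample_alt items max_chars
instance (items : List (List (String × String))) (max_chars : Int) (out : String) : Decidable (Spec_transcript_sample items max_chars out) := by unfold Spec_transcript_sample; infer_instance

-- ===== CLAIM (what is proved, stated in full; the proofs are below) =====
def Claim_equal_transcript_sample : Prop := ∀ (items : List (List (String × String))) (max_chars : Int), Dom_transcript_sample items max_chars → Spec_transcript_sample items max_chars (transcript_sample items max_chars)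

-- ===== LEMMAS AND PROOFS =====

-- sum of the lengths of the first k lines
def tsS (lines : List String) (k : Nat) : Int := ((lines.take k).map PySem.Str.len).sum

-- A's loop, rephrased on the list of lines: keep while the running total fits
def tsTakeG (max_chars : Int) : List String → Int → List String
  | [], _ => []
  | l :: ls, used =>
    if used + PySem.Str.len l > max_chars then []
    else l :: tsTakeG max_chars ls (used + PySem.Str.len l)

-- the prefix sums, structurally
def tsPsums (t : Int) : List String → List Int
  | [] => []
  | l :: ls => (t + PySem.Str.len l) :: tsPsums (t + PySem.Str.len l) ls

theorem tsLoop_eq_takeG (max_chars : Int) :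
    ∀ (items : List (List (String × String))) (index used : Int) (parts : List String),
      tsLoop max_chars items index used parts =
        parts ++ tsTakeG max_chars ((PySem.List.enumerate items index).map (fun p => tsLine p.1 p.2)) used := by
  intro items
  induction items with
  | nil => intro index used parts; simp [tsLoop, PySem.List.enumerate_nil, tsTakeG]
  | cons item rest ih =>
    intro index used parts
    rw [PySem.List.enumerate_cons]
    simp only [tsLoop, List.map_cons, tsTakeG]
    split_ifs with h
    · simp
    · rw [ih]; simp

theorem tsPrefix_foldl (lines : List String) :
    ∀ (a : List Int) (t : Int),
      lines.foldl (fun st ln => (st.1 ++ [st.2 + PySem.Str.len ln], st.2 + PySem.Str.len ln)) (a, t) =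
        (a ++ tsPsums t lines, t + (lines.map PySem.Str.len).sum) := by
  induction lines with
  | nil => intro a t; simp [tsPsums]
  | cons l ls ih =>
    intro a t
    simp only [List.foldl_cons, ih, tsPsums, List.map_cons, List.sum_cons]
    simp [List.append_assoc, add_assoc]

theorem tsPrefix_eq (lines : List String) : tsPrefix lines = tsPsums 0 lines := by
  unfold tsPrefix
  rw [tsPrefix_foldl]
  simp

theorem tsPsums_length (lines : List String) : ∀ t, (tsPsums t lines).length = lines.length := by
  induction lines with
  | nil => intro t; rfl
  | cons l ls ih => intro t; simp [tsPsums, ih]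

theorem tsS_cons_succ (l : String) (ls : List String) (k : Nat) :
    tsS (l :: ls) (k + 1) = PySem.Str.len l + tsS ls k := by
  simp [tsS, List.take_succ_cons]

theorem tsPsums_getD (lines : List String) :
    ∀ (t : Int) (i : Nat), i < lines.length → (tsPsums t lines).getD i 0 = t + tsS lines (i + 1) := by
  induction lines with
  | nil => intro t i h; simp at h
  | cons l ls ih =>
    intro t i h
    cases i with
    | zero => simp [tsPsums, tsS]
    | succ i =>
      simp only [tsPsums, List.getD_cons_succ]
      rw [ih (t + PySem.Str.len l) i (by simpa using h), tsS_cons_succ]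
      ring

theorem tsLen_nonneg (s : String) : 0 ≤ PySem.Str.len s := by
  rw [PySem.Str.len_eq]; exact_mod_cast Int.natCast_nonneg _

theorem tsS_mono (lines : List String) {a b : Nat} (h : a ≤ b) : tsS lines a ≤ tsS lines b := by
  have : lines.take b = lines.take a ++ (lines.drop a).take (b - a) := by
    rw [← List.take_add]; congr 1; omega
  unfold tsS
  rw [this, List.map_append, List.sum_append]
  have : 0 ≤ (((lines.drop a).take (b - a)).map PySem.Str.len).sum := by
    apply List.sum_nonneg
    intro x hx
    rcases List.mem_map.mp hx with ⟨s, _, rfl⟩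
    exact tsLen_nonneg s
  omega

theorem tsSearch_inv (pre : List Int) (max_chars : Int)
    (hmono : ∀ i j : Nat, i ≤ j → j < pre.length → pre.getD j 0 ≤ max_chars → pre.getD i 0 ≤ max_chars) :
    ∀ (n lo hi : Nat), hi - lo ≤ n → lo ≤ hi → hi ≤ pre.length →
      (∀ i, i < lo → pre.getD i 0 ≤ max_chars) →
      (∀ i, hi ≤ i → i < pre.length → ¬ pre.getD i 0 ≤ max_chars) →
      tsSearch pre max_chars lo hi ≤ pre.length ∧
      (∀ i, i < tsSearch pre max_chars lo hi → pre.getD i 0 ≤ max_chars) ∧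
      (∀ i, tsSearch pre max_chars lo hi ≤ i → i < pre.length → ¬ pre.getD i 0 ≤ max_chars) := by
  intro n
  induction n with
  | zero =>
    intro lo hi hn hlh hhl h1 h2
    have : ¬ lo < hi := by omega
    rw [tsSearch, if_neg this]
    exact ⟨by omega, fun i hi' => h1 i hi', fun i hi' hilen => h2 i (by omega) hilen⟩
  | succ n ih =>
    intro lo hi hn hlh hhl h1 h2
    rw [tsSearch]
    by_cases h : lo < hi
    · rw [if_pos h]
      show (if pre.getD ((lo + hi) / 2) 0 ≤ max_chars then tsSearch pre max_chars ((lo + hi) / 2 + 1) hi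
            else tsSearch pre max_chars lo ((lo + hi) / 2)) ≤ pre.length ∧ _ ∧ _
      have hmid1 : lo ≤ (lo + hi) / 2 := by omega
      have hmid2 : (lo + hi) / 2 < hi := by omega
      by_cases hc : pre.getD ((lo + hi) / 2) 0 ≤ max_chars
      · rw [if_pos hc]
        exact ih ((lo + hi) / 2 + 1) hi (by omega) (by omega) hhl
          (fun i hi' => hmono i ((lo + hi) / 2) (by omega) (by omega) hc) h2
      · rw [if_neg hc]
        refine ih lo ((lo + hi) / 2) (by omega) (by omega) (by omega) h1 ?_
        intro i hi' hilen hP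
        exact hc (hmono ((lo + hi) / 2) i hi' hilen hP)
    · rw [if_neg h]
      exact ⟨by omega, fun i hi' => h1 i (by omega), fun i hi' hilen => h2 i (by omega) hilen⟩

theorem tsTakeG_eq_take (max_chars : Int) :
    ∀ (lines : List String) (used : Int) (r : Nat), r ≤ lines.length →
      (∀ i, i < r → used + tsS lines (i + 1) ≤ max_chars) →
      (r < lines.length → ¬ (used + tsS lines (r + 1) ≤ max_chars)) →
      tsTakeG max_chars lines used = lines.take r := by
  intro lines
  induction lines with
  | nil => intro used r _ _ _; simp [tsTakeG]
  | cons l ls ih =>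
    intro used r hr h1 h2
    cases r with
    | zero =>
      have hbad := h2 (by simp)
      rw [tsS_cons_succ] at hbad
      simp only [tsS, List.take_zero, List.map_nil, List.sum_nil] at hbad
      simp only [tsTakeG, List.take_zero]
      rw [if_pos (by omega)]
    | succ r =>
      have hok := h1 0 (by omega)
      rw [tsS_cons_succ] at hok
      simp only [tsS, List.take_zero, List.map_nil, List.sum_nil] at hok
      simp only [tsTakeG, List.take_succ_cons]
      rw [if_neg (by omega)]
      congr 1
      refine ih (used + PySem.Str.len l) r (by simpa using hr) ?_ ?_
      · intro i hi'
        have := h1 (i + 1) (by omega)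
        rw [tsS_cons_succ] at this
        omega
      · intro hrlen
        have := h2 (by simpa using hrlen)
        rw [tsS_cons_succ] at this
        omega

-- ===== VERDICT (by name: the statement is the Claim_ definition above) =====
theorem transcript_sample_spec : Claim_equal_transcript_sample := by
  intro items max_chars _dom
  unfold Spec_transcript_sample transcript_sample transcript_sample_alt
  set lines := (PySem.List.enumerate items 1).map (fun p => tsLine p.1 p.2) with hlines
  have hprelen : (tsPrefix lines).length = lines.length := by
    rw [tsPrefix_eq, tsPsums_length]
  have hgetD : ∀ i, i < lines.length → (tsPrefix lines).getD i 0 = tsS lines (i + 1) := by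
    intro i hi
    rw [tsPrefix_eq, tsPsums_getD lines 0 i hi, zero_add]
  have hmono : ∀ i j : Nat, i ≤ j → j < (tsPrefix lines).length →
      (tsPrefix lines).getD j 0 ≤ max_chars → (tsPrefix lines).getD i 0 ≤ max_chars := by
    intro i j hij hj hP
    rw [hprelen] at hj
    rw [hgetD j hj] at hP
    rw [hgetD i (by omega)]
    have := tsS_mono lines (show i + 1 ≤ j + 1 by omega)
    omega
  obtain ⟨hle, hin, hout⟩ := tsSearch_inv (tsPrefix lines) max_chars hmono lines.length 0 lines.length
    (by omega) (by omega) hprelen.ge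
    (by intro i hi; omega)
    (by intro i hge hlt; rw [hprelen] at hlt; omega)
  rw [hprelen] at hle
  show PySem.Str.join "" (tsLoop max_chars items 1 0 []) =
    PySem.Str.join "" (lines.take (tsSearch (tsPrefix lines) max_chars 0 lines.length))
  rw [tsLoop_eq_takeG, List.nil_append, ← hlines]
  congr 1
  apply tsTakeG_eq_take max_chars lines 0 _ hle
  · intro i hi
    have h1 := hin i hi
    rw [hgetD i (by omega)] at h1
    omega
  · intro hrlen
    have h2 := hout (tsSearch (tsPrefix lines) max_chars 0 lines.length) le_rfl (by omega)
    rw [hgetD _ hrlen] at h2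
    omega
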